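-- pv_equiv track=rewrite | github.com/rootulp/hackerrank | python/triple-sum.py | get_num_special_triplets
-- ===== SOURCE A (Python) =====
-- def get_num_special_triplets(list_a, list_b, list_c):
--     # remove duplicates and sort lists
--     list_a = sorted(set(list_a))
--     list_b = sorted(set(list_b))
--     list_c = sorted(set(list_c))
--
--     num_special_triplets = 0
--
--     for b in list_b:
--         len_a_candidates = num_elements_less_than(b, list_a)
--         len_c_candidates = num_elements_less_than(b, list_c)
--         num_special_triplets += 1 * len_a_candidates * len_c_candidates
--
--     return num_special_triplets
--
-- def num_elements_less_than(target, sorted_list):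
--     for index, candidate in enumerate(sorted_list):
--         if candidate > target:
--             return index
--     return len(sorted_list)
-- ===== SOURCE B (Python) =====
-- def get_num_special_triplets(list_a, list_b, list_c):
--     # sort-deduplicate a and c once, then binary-search per distinct b
--     sorted_a = sorted(set(list_a))
--     sorted_c = sorted(set(list_c))
--     total = 0
--     for b in set(list_b):
--         total += _bisect_right(sorted_a, b) * _bisect_right(sorted_c, b)
--     return total
--
-- def _bisect_right(xs, x):
--     lo, hi = 0, len(xs)
--     while lo < hi:
--         mid = (lo + hi) // 2
--         if xs[mid] <= x:
--             lo = mid + 1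
--         else:
--             hi = mid
--     return lo
-- ===== Notes on version B (the rewrite author's own statement) =====
-- stated objective: faster
-- what changed: Per-b counting by hand-written binary search (bisect_right) on the sorted deduplicated a and c lists, summing over the distinct b values without sorting them, instead of A's linear early-exit scan of both lists for every b.
import Mathlib
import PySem

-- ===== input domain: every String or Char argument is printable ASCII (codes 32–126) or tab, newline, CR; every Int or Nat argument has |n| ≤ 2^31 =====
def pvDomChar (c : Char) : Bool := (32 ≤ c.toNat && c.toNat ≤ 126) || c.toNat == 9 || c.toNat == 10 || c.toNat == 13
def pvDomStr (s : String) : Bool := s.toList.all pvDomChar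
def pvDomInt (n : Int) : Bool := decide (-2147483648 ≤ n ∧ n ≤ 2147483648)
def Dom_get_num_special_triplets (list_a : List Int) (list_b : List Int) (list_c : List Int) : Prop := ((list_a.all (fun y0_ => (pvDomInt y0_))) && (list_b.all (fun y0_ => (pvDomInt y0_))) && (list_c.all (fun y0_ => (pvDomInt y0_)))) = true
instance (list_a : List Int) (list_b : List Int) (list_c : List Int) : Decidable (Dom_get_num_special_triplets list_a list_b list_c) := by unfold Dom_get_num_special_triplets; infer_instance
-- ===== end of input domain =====

-- ===== PORT A =====
-- B replaces A's per-b linear scans by hand-written binary searches on the sorted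
-- deduplicated lists and sums over the distinct b's without sorting them (alternative,
-- asymptotically fewer comparisons); return values agree everywhere.

-- A's helper: `for index, candidate in enumerate(sorted_list): if candidate > target: return index; return len(...)`
def neltFrom (target : Int) : List Int → Nat → Int → Int
  | [], _, total => total
  | c :: rest, idx, total =>
      if c > target then (idx : Int) else neltFrom target rest (idx + 1) total

def num_elements_less_than (target : Int) (sorted_list : List Int) : Int :=
  neltFrom target sorted_list 0 (sorted_list.length : Int)

def get_num_special_triplets (list_a : List Int) (list_b : List Int) (list_c : List Int) : Int :=
  let sa := PySem.List.sorted (PySem.Set.ofList list_a) (fun x => x) false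
  let sb := PySem.List.sorted (PySem.Set.ofList list_b) (fun x => x) false
  let sc := PySem.List.sorted (PySem.Set.ofList list_c) (fun x => x) false
  sb.foldl (fun acc b =>
    acc + 1 * num_elements_less_than b sa * num_elements_less_than b sc) 0

-- ===== PORT B =====
-- B's hand-written bisect_right loop; xs[mid] is always in range here (0 ≤ lo ≤ mid < hi ≤ len xs),
-- and Python's (lo + hi) // 2 on the nonnegative ints lo, hi is exactly Nat division here
def brLoop (xs : List Int) (x : Int) (lo hi : Nat) : Nat :=
  if h : lo < hi then
    let mid := (lo + hi) / 2
    if PySem.List.pyGetD xs (mid : Int) 0 ≤ x then brLoop xs x (mid + 1) hi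
    else brLoop xs x lo mid
  else lo
termination_by hi - lo
decreasing_by all_goals omega

def bisect_right (xs : List Int) (x : Int) : Nat := brLoop xs x 0 xs.length

def get_num_special_triplets_alt (list_a : List Int) (list_b : List Int) (list_c : List Int) : Int :=
  let sorted_a := PySem.List.sorted (PySem.Set.ofList list_a) (fun x => x) false
  let sorted_c := PySem.List.sorted (PySem.Set.ofList list_c) (fun x => x) false
  (PySem.Set.ofList list_b).foldl (fun total b =>
    total + (bisect_right sorted_a b : Int) * (bisect_right sorted_c b : Int)) 0

-- ===== PRECONDITION & SPEC =====
def Spec_get_num_special_triplets (list_a : List Int) (list_b : List Int) (list_c : List Int) (out : Int) : Prop := out = get_num_special_triplets_alt list_a list_b list_c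
instance (list_a : List Int) (list_b : List Int) (list_c : List Int) (out : Int) : Decidable (Spec_get_num_special_triplets list_a list_b list_c out) := by unfold Spec_get_num_special_triplets; infer_instance

-- ===== CLAIM (what is proved, stated in full; the proofs are below) =====
def Claim_equal_get_num_special_triplets : Prop := ∀ (list_a : List Int) (list_b : List Int) (list_c : List Int), Dom_get_num_special_triplets list_a list_b list_c → Spec_get_num_special_triplets list_a list_b list_c (get_num_special_triplets list_a list_b list_c)

-- ===== LEMMAS AND PROOFS =====

-- A's scan counts the `≤ target` prefix: neltFrom returns takeWhile's length (no sortedness needed).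
theorem neltFrom_eq_takeWhile (t : Int) (l : List Int) (idx : Nat) :
    neltFrom t l idx ((idx + l.length : Nat) : Int)
      = ((idx + (l.takeWhile (fun c => decide (c ≤ t))).length : Nat) : Int) := by
  induction l generalizing idx with
  | nil => simp [neltFrom]
  | cons c rest ih =>
    by_cases h : c > t
    · simp [neltFrom, h, show ¬ c ≤ t by omega]
    · have h' : c ≤ t := by omega
      have := ih (idx + 1)
      simp only [neltFrom, h, if_false, List.takeWhile_cons, h', decide_true, if_true,
        List.length_cons] at *
      rw [show idx + (rest.length + 1) = (idx + 1) + rest.length by omega, this]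
      congr 1
      omega

theorem nelt_eq_takeWhile (t : Int) (l : List Int) :
    num_elements_less_than t l = (((l.takeWhile (fun c => decide (c ≤ t))).length : Nat) : Int) := by
  have := neltFrom_eq_takeWhile t l 0
  simpa [num_elements_less_than] using this

-- the element just after the takeWhile prefix fails the predicate
theorem takeWhile_next_false (p : Int → Bool) (xs : List Int)
    (h : (xs.takeWhile p).length < xs.length) :
    p (xs[(xs.takeWhile p).length]'h) = false := by
  induction xs with
  | nil => simp at h
  | cons c rest ih =>
    by_cases hc : p c
    · simp only [List.takeWhile_cons, hc, if_true, List.length_cons] at h ⊢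
      simpa using ih (by omega)
    · simp [hc]

-- the bisect-right property of k = |takeWhile (≤ x)| on a ≤-sorted list
theorem takeWhile_le_prop (xs : List Int) (x : Int)
    (hs : xs.Pairwise (fun a b => a ≤ b)) :
    (xs.takeWhile (fun c => decide (c ≤ x))).length ≤ xs.length ∧
    (∀ j, (hj : j < xs.length) → j < (xs.takeWhile (fun c => decide (c ≤ x))).length → xs[j] ≤ x) ∧
    (∀ j, (hj : j < xs.length) → (xs.takeWhile (fun c => decide (c ≤ x))).length ≤ j → x < xs[j]) := by
  have hlen : (xs.takeWhile (fun c => decide (c ≤ x))).length ≤ xs.length :=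
    List.Sublist.length_le (xs.takeWhile_sublist _)
  refine ⟨hlen, ?_, ?_⟩
  · intro j hj hjk
    have hpref := xs.takeWhile_prefix (fun c => decide (c ≤ x))
    have heq : (xs.takeWhile (fun c => decide (c ≤ x)))[j]'hjk = xs[j] := hpref.getElem hjk
    have hmem : (xs.takeWhile (fun c => decide (c ≤ x)))[j]'hjk
        ∈ xs.takeWhile (fun c => decide (c ≤ x)) := List.getElem_mem _
    have hpj := List.mem_takeWhile_imp hmem
    rw [heq] at hpj
    simpa using hpj
  · intro j hj hjk
    have hklt : (xs.takeWhile (fun c => decide (c ≤ x))).length < xs.length :=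
      lt_of_le_of_lt hjk hj
    have hfail := takeWhile_next_false (fun c => decide (c ≤ x)) xs hklt
    simp only [decide_eq_false_iff_not, not_le] at hfail
    rcases eq_or_lt_of_le hjk with heq | hlt
    · subst heq; exact hfail
    · have hmono := (List.pairwise_iff_getElem.mp hs)
        (xs.takeWhile (fun c => decide (c ≤ x))).length j hklt hj hlt
      omega

-- the binary-search loop lands on the same k (fuel n bounds hi - lo)
theorem brLoop_eq_aux (xs : List Int) (x : Int)
    (hs : xs.Pairwise (fun a b => a ≤ b)) :
    ∀ n lo hi, hi - lo ≤ n → lo ≤ hi → hi ≤ xs.length →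
      (∀ j, (hj : j < xs.length) → j < lo → xs[j] ≤ x) →
      (∀ j, (hj : j < xs.length) → hi ≤ j → x < xs[j]) →
      brLoop xs x lo hi = (xs.takeWhile (fun c => decide (c ≤ x))).length := by
  intro n
  induction n with
  | zero =>
    intro lo hi hfuel hlohi hhilen hpre hsuf
    have hlohi' : lo = hi := by omega
    subst hlohi'
    rw [brLoop]
    simp only [lt_irrefl, dif_neg, not_false_iff]
    obtain ⟨hkle, hkpre, hksuf⟩ := takeWhile_le_prop xs x hs
    rcases Nat.lt_trichotomy lo ((xs.takeWhile (fun c => decide (c ≤ x))).length) with hlt | heq | hgt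
    · have hklen : lo < xs.length := by omega
      have h1 := hkpre lo hklen hlt
      have h2 := hsuf lo hklen (le_refl _)
      omega
    · exact heq
    · have hklen : (xs.takeWhile (fun c => decide (c ≤ x))).length < xs.length := by omega
      have h1 := hpre _ hklen hgt
      have h2 := hksuf _ hklen (le_refl _)
      omega
  | succ n ih =>
    intro lo hi hfuel hlohi hhilen hpre hsuf
    by_cases h : lo < hi
    · have hmidlt : (lo + hi) / 2 < hi := by omega
      have hmidge : lo ≤ (lo + hi) / 2 := by omega
      have hmidlen : (lo + hi) / 2 < xs.length := by omega
      rw [brLoop]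
      simp only [h, dif_pos]
      have hget : PySem.List.pyGetD xs (((lo + hi) / 2 : Nat) : Int) 0
          = xs[(lo + hi) / 2]'hmidlen := by
        rw [PySem.List.pyGetD_natCast]
        exact List.getD_eq_getElem xs 0 hmidlen
      rw [hget]
      by_cases hle : xs[(lo + hi) / 2]'hmidlen ≤ x
      · simp only [hle, if_pos]
        refine ih ((lo + hi) / 2 + 1) hi (by omega) (by omega) hhilen ?_ hsuf
        intro j hj hjlt
        rcases Nat.lt_or_ge j lo with hc | hc
        · exact hpre j hj hc
        · rcases eq_or_lt_of_le (show j ≤ (lo + hi) / 2 by omega) with heq | hlt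
          · subst heq; exact hle
          · have := (List.pairwise_iff_getElem.mp hs) j ((lo + hi) / 2) hj hmidlen hlt
            omega
      · simp only [hle, if_false]
        refine ih lo ((lo + hi) / 2) (by omega) (by omega) (by omega) hpre ?_
        intro j hj hjge
        rcases eq_or_lt_of_le hjge with heq | hlt
        · subst heq; omega
        · have := (List.pairwise_iff_getElem.mp hs) ((lo + hi) / 2) j hmidlen hj hlt
          omega
    · exact ih lo hi (by omega) hlohi hhilen hpre hsuf

theorem bisect_right_eq (xs : List Int) (x : Int)
    (hs : xs.Pairwise (fun a b => a ≤ b)) :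
    bisect_right xs x = (xs.takeWhile (fun c => decide (c ≤ x))).length :=
  brLoop_eq_aux xs x hs xs.length 0 xs.length (by omega) (Nat.zero_le _) (le_refl _)
    (by intro j hj hjlt; omega) (by intro j hj hjge; omega)

-- ===== VERDICT (by name: the statement is the Claim_ definition above) =====
theorem get_num_special_triplets_spec : Claim_equal_get_num_special_triplets := by
  intro list_a list_b list_c _
  unfold Spec_get_num_special_triplets get_num_special_triplets get_num_special_triplets_alt
  set sa := PySem.List.sorted (PySem.Set.ofList list_a) (fun x => x) false with hsa
  set sb := PySem.List.sorted (PySem.Set.ofList list_b) (fun x => x) false with hsb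
  set sc := PySem.List.sorted (PySem.Set.ofList list_c) (fun x => x) false with hsc
  have hpa : sa.Pairwise (fun a b => a ≤ b) :=
    (PySem.List.sorted_ofList_pairwise_lt list_a).imp (fun h => le_of_lt h)
  have hpc : sc.Pairwise (fun a b => a ≤ b) :=
    (PySem.List.sorted_ofList_pairwise_lt list_c).imp (fun h => le_of_lt h)
  rw [PySem.List.foldl_add, PySem.List.foldl_add]
  have h1 : (sb.map (fun b => 1 * num_elements_less_than b sa * num_elements_less_than b sc))
      = sb.map (fun b => (bisect_right sa b : Int) * (bisect_right sc b : Int)) := by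
    refine List.map_congr_left (fun b _ => ?_)
    rw [nelt_eq_takeWhile, nelt_eq_takeWhile, bisect_right_eq sa b hpa, bisect_right_eq sc b hpc]
    ring
  have hperm : sb.Perm (PySem.Set.ofList list_b) :=
    PySem.List.sorted_perm (PySem.Set.ofList list_b) (fun x => x) false
  rw [h1, List.Perm.sum_eq (hperm.map _)]
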